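-- pv_equiv track=rewrite | github.com/OlivierStankiewicz/Python | 78_3.py | skrot
-- ===== SOURCE A (Python) =====
-- def skrot(w):
--     S = ['A', 'L', 'G', 'O', 'R', 'Y', 'T', 'M']
--     for i in range(8):
--         S[i] = ord(S[i])
--
--     for i in range(8-len(w) % 8):
--         w += '.'
--
--     n = 0
--     for i in range(len(w) // 8):
--         for j in range(8):
--             S[j] += ord(w[n])
--             S[j] %= 128
--
--             n += 1
--
--     wyn = ''
--     for i in range(8):
--         wyn += chr(65 + S[i] % 26)
--
--     return wyn
-- ===== SOURCE B (Python) =====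
-- def skrot(w):
--     pad = w + '.' * (8 - len(w) % 8)
--     accs = [(ord(s) + sum(ord(c) for c in pad[j::8])) % 128
--             for j, s in enumerate('ALGORYTM')]
--     return ''.join(chr(65 + a % 26) for a in accs)
-- ===== Notes on version B (the rewrite author's own statement) =====
-- stated objective: simpler
-- what changed: A pads then runs a nested chunk-by-chunk loop mutating an 8-slot list with a running character index and per-step mod; B computes each of the 8 output letters independently as (seed + sum of ords of the stride-8 column slice pad[j::8]) % 128, built with comprehensions and join.
import Mathlib
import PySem

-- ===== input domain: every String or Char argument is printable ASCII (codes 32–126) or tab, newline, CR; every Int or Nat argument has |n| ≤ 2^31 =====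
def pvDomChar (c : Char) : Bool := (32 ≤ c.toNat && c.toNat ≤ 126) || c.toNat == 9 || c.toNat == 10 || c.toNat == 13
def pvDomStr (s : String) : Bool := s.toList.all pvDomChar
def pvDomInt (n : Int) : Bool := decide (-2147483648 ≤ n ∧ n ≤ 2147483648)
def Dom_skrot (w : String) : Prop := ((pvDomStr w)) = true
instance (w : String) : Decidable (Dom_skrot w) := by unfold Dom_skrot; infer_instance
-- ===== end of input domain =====

-- B replaces A's in-place double loop (mutated 8-slot list, running index, per-step mod) by
-- independent column sums over the stride-8 slices of the padded string (objective: simpler).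

-- ===== PORT A =====
-- literal transliteration of A: pad with dots, then nested loop mutating S with a running index n
def skrot (w : String) : String :=
  let S0 : List Int := ['A', 'L', 'G', 'O', 'R', 'Y', 'T', 'M'].map (fun c => ((c.toNat : Int)))
  -- for i in range(8 - len(w) % 8): w += '.'
  let wp : List Char :=
    (PySem.List.pyRange 0 (8 - PySem.Int.mod (PySem.List.len w.toList) 8) 1).foldl
      (fun acc _ => acc ++ ['.']) w.toList
  -- n = 0; for i in range(len(w)//8): for j in range(8): S[j] += ord(w[n]); S[j] %= 128; n += 1
  -- (w[n] is always in range here, so the pyGetD default is never used)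
  let SN : List Int × Int :=
    (PySem.List.pyRange 0 (PySem.Int.floordiv (PySem.List.len wp) 8) 1).foldl
      (fun sn _ =>
        (PySem.List.pyRange 0 8 1).foldl
          (fun sn j =>
            (PySem.List.pySetD sn.1 j
              (PySem.Int.mod (PySem.List.pyGetD sn.1 j 0 + ((PySem.List.pyGetD wp sn.2 '.').toNat : Int)) 128),
             sn.2 + 1))
          sn)
      (S0, 0)
  -- wyn = ''; for i in range(8): wyn += chr(65 + S[i] % 26)
  let wyn : List Char :=
    (PySem.List.pyRange 0 8 1).foldl
      (fun acc i => acc ++ [Char.ofNat (65 + PySem.Int.mod (PySem.List.pyGetD SN.1 i 0) 26).toNat]) []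
  String.ofList wyn

-- ===== PORT B =====
-- literal transliteration of B: pad, then per-column accs[j] = (ord(s) + sum of ords of pad[j::8]) % 128
def skrot_alt (w : String) : String :=
  let pad : List Char := w.toList ++ List.replicate (8 - w.toList.length % 8) '.'
  let accs : List Int :=
    (PySem.List.enumerate "ALGORYTM".toList).map (fun js =>
      PySem.Int.mod
        ((js.2.toNat : Int) +
          (((PySem.List.slice? pad (some js.1) none 8).getD []).map
              (fun c => (c.toNat : Int))).sum)
        128)
  String.ofList (accs.map (fun a => Char.ofNat (65 + PySem.Int.mod a 26).toNat))

-- ===== PRECONDITION & SPEC =====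
def Spec_skrot (w : String) (out : String) : Prop := out = skrot_alt w
instance (w : String) (out : String) : Decidable (Spec_skrot w out) := by unfold Spec_skrot; infer_instance

-- ===== CLAIM (what is proved, stated in full; the proofs are below) =====
def Claim_equal_skrot : Prop := ∀ (w : String), Dom_skrot w → Spec_skrot w (skrot w)

-- ===== LEMMAS AND PROOFS =====

-- the dot-padding loop of A appends one '.' per loop index
lemma pv_foldl_dots (xs : List Char) (l : List Int) :
    l.foldl (fun acc _ => acc ++ ['.']) xs = xs ++ List.replicate l.length '.' := by
  induction l generalizing xs with
  | nil => simp
  | cons a l ih => simp [List.foldl_cons, ih, List.replicate_succ]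

-- column sum of the ords of column j of the first i chunks
def pvCol (pad : List Char) (j i : Nat) : Int :=
  ((List.range i).map (fun t => ((pad.getD (8 * t + j) '.').toNat : Int))).sum

lemma pv_mod_add (x y : Int) :
    PySem.Int.mod (PySem.Int.mod x 128 + y) 128 = PySem.Int.mod (x + y) 128 := by
  rw [PySem.Int.mod_eq_emod_of_pos (by norm_num), PySem.Int.mod_eq_emod_of_pos (by norm_num),
    PySem.Int.mod_eq_emod_of_pos (by norm_num)]
  omega

-- one pass of A's inner 8-step loop, started at index n
lemma pv_inner (pad : List Char) (a0 a1 a2 a3 a4 a5 a6 a7 : Int) (n : Nat) :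
    (PySem.List.pyRange 0 8 1).foldl
      (fun (sn : List Int × Int) j =>
        (PySem.List.pySetD sn.1 j
          (PySem.Int.mod (PySem.List.pyGetD sn.1 j 0 + ((PySem.List.pyGetD pad sn.2 '.').toNat : Int)) 128),
         sn.2 + 1))
      ([a0, a1, a2, a3, a4, a5, a6, a7], (n : Int)) =
    ([PySem.Int.mod (a0 + ((pad.getD n '.').toNat : Int)) 128,
      PySem.Int.mod (a1 + ((pad.getD (n + 1) '.').toNat : Int)) 128,
      PySem.Int.mod (a2 + ((pad.getD (n + 2) '.').toNat : Int)) 128,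
      PySem.Int.mod (a3 + ((pad.getD (n + 3) '.').toNat : Int)) 128,
      PySem.Int.mod (a4 + ((pad.getD (n + 4) '.').toNat : Int)) 128,
      PySem.Int.mod (a5 + ((pad.getD (n + 5) '.').toNat : Int)) 128,
      PySem.Int.mod (a6 + ((pad.getD (n + 6) '.').toNat : Int)) 128,
      PySem.Int.mod (a7 + ((pad.getD (n + 7) '.').toNat : Int)) 128], ((n : Int) + 8)) := by
  have h : PySem.List.pyRange 0 8 1 = [0,1,2,3,4,5,6,7] := by decide
  simp only [h, List.foldl_cons, List.foldl_nil]
  simp [PySem.List.pySetD_of_nonneg, PySem.List.pyGetD_of_nonneg]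
  refine ⟨⟨?_,?_,?_,?_,?_,?_,?_⟩, by ring⟩ <;>
  · rw [PySem.List.pyGetD_of_nonneg pad '.' (by positivity), List.getD_eq_getElem?_getD]
    congr 2

-- A's outer loop computes, per column, the mod-128 sum of seed and column sum
lemma pv_loopA (pad : List Char) (i : Nat) :
    (PySem.List.pyRange 0 (i : Int) 1).foldl
      (fun (sn : List Int × Int) _ =>
        (PySem.List.pyRange 0 8 1).foldl
          (fun sn j =>
            (PySem.List.pySetD sn.1 j
              (PySem.Int.mod (PySem.List.pyGetD sn.1 j 0 + ((PySem.List.pyGetD pad sn.2 '.').toNat : Int)) 128),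
             sn.2 + 1))
          sn)
      ([65, 76, 71, 79, 82, 89, 84, 77], 0) =
    ([PySem.Int.mod (65 + pvCol pad 0 i) 128,
      PySem.Int.mod (76 + pvCol pad 1 i) 128,
      PySem.Int.mod (71 + pvCol pad 2 i) 128,
      PySem.Int.mod (79 + pvCol pad 3 i) 128,
      PySem.Int.mod (82 + pvCol pad 4 i) 128,
      PySem.Int.mod (89 + pvCol pad 5 i) 128,
      PySem.Int.mod (84 + pvCol pad 6 i) 128,
      PySem.Int.mod (77 + pvCol pad 7 i) 128], ((8 * i : Nat) : Int)) := by
  induction i with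
  | zero =>
    simp [pvCol]
  | succ i ih =>
    rw [show (((i + 1 : Nat)) : Int) = (i : Int) + 1 by push_cast; ring,
      PySem.List.pyRange_one_succ_right (by positivity), List.foldl_append, ih,
      List.foldl_cons, List.foldl_nil, pv_inner]
    have hc : ∀ j : Nat, pvCol pad j (i + 1) = pvCol pad j i + ((pad.getD (8 * i + j) '.').toNat : Int) := by
      intro j
      simp [pvCol, List.range_succ]
    refine Prod.ext ?_ ?_
    · simp only [pv_mod_add, hc]
      norm_num [add_assoc]
    · push_cast
      ring

-- B's stride-8 slice of a pad of length 8*m is exactly column j of the m chunks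
lemma pv_slice (pad : List Char) (m j : Nat) (hm : pad.length = 8 * m) (h1 : 1 ≤ m) (hj : j < 8) :
    (PySem.List.slice? pad (some (j : Int)) none 8).getD [] =
      (List.range m).map (fun t => pad.getD (8 * t + j) '.') := by
  rw [PySem.List.slice?]
  simp only [PySem.List.sliceIndices, hm]
  norm_num
  have h2 : ¬ ((j:Int) < 0) := by omega
  have h3 : min ((j:Int)) (8*(m:Int)) = (j:Int) := by omega
  have h4 : ((j:Int)) < 8*(m:Int) := by omega
  rw [if_neg h2, h3, if_pos h4]
  have h5 : (((8*(m:Int) - (j:Int)) + 8 - 1)/8).toNat = m := by omega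
  rw [h5]
  rw [List.filterMap_congr (g := fun t => some (pad.getD (8*t+j) '.')) ?_]
  · simp
  · intro x hx
    simp only [List.mem_range] at hx
    have hlt : 8 * x + j < pad.length := by omega
    have hidx : ((j:Int) + 8*(x:Int)).toNat = 8*x + j := by omega
    rw [hidx]
    simp [List.getElem?_eq_getElem hlt, List.getD]

lemma pv_main (w : String) : skrot w = skrot_alt w := by
  have hm8 : w.toList.length % 8 < 8 := Nat.mod_lt _ (by norm_num)
  have hmod : PySem.Int.mod (PySem.List.len w.toList) 8 = ((w.toList.length % 8 : Nat) : Int) := by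
    rw [PySem.List.len_eq]; exact_mod_cast PySem.Int.mod_natCast w.toList.length 8
  have hsub : (8 : Int) - ((w.toList.length % 8 : Nat) : Int) = ((8 - w.toList.length % 8 : Nat) : Int) := by
    push_cast; omega
  set r := 8 - w.toList.length % 8 with hr
  set pad := w.toList ++ List.replicate r '.' with hpad
  set M := w.toList.length / 8 + 1 with hM
  have hM1 : 1 ≤ M := by omega
  have hlen : pad.length = 8 * M := by
    rw [hpad]; simp [hr, hM]; omega
  have hS0 : List.map (fun c => ((c.toNat : Int))) ['A', 'L', 'G', 'O', 'R', 'Y', 'T', 'M']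
      = ([65, 76, 71, 79, 82, 89, 84, 77] : List Int) := by decide
  have hwp : List.foldl (fun acc _ => acc ++ ['.']) w.toList (List.map (fun k => ((k : Nat) : Int)) (List.range r)) = pad := by
    rw [pv_foldl_dots, List.length_map, List.length_range, hpad]
  have hfd : PySem.Int.floordiv (PySem.List.len pad) 8 = (M:Int) := by
    rw [PySem.List.len_eq, hlen]
    calc PySem.Int.floordiv ((8*M : Nat) : Int) 8
        = (((8*M)/8 : Nat) : Int) := by exact_mod_cast PySem.Int.floordiv_natCast (8*M) 8
      _ = (M : Int) := by rw [Nat.mul_div_cancel_left _ (by norm_num)]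
  have hs : ∀ jn : Nat, jn < 8 →
      (((PySem.List.slice? pad (some (jn : Int)) none 8).getD []).map (fun c => (c.toNat : Int))).sum
        = pvCol pad jn M := by
    intro jn hjn
    rw [pv_slice pad M jn hlen hM1 hjn]
    simp [pvCol, List.map_map, Function.comp_def]
  have hs0 := hs 0 (by norm_num); have hs1 := hs 1 (by norm_num)
  have hs2 := hs 2 (by norm_num); have hs3 := hs 3 (by norm_num)
  have hs4 := hs 4 (by norm_num); have hs5 := hs 5 (by norm_num)
  have hs6 := hs 6 (by norm_num); have hs7 := hs 7 (by norm_num)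
  norm_num at hs0 hs1 hs2 hs3 hs4 hs5 hs6 hs7
  unfold skrot skrot_alt
  rw [hmod, hsub, PySem.List.pyRange_zero_natCast]
  simp only [hwp, hS0, hfd, pv_loopA pad M]
  rw [show PySem.List.pyRange 0 8 1 = [0,1,2,3,4,5,6,7] from by decide,
      show PySem.List.enumerate "ALGORYTM".toList
        = [((0:Int),'A'),(1,'L'),(2,'G'),(3,'O'),(4,'R'),(5,'Y'),(6,'T'),(7,'M')] from by decide,
      ← hr, ← hpad]
  simp only [List.foldl_cons, List.foldl_nil, List.map_cons, List.map_nil]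
  simp [PySem.List.pyGetD_of_nonneg, hs0, hs1, hs2, hs3, hs4, hs5, hs6, hs7]

-- ===== VERDICT (by name: the statement is the Claim_ definition above) =====
theorem skrot_spec : Claim_equal_skrot := by
  intro w _
  unfold Spec_skrot
  exact pv_main w
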